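-- pv_equiv track=rewrite | github.com/ARGrus90/mics_cases | mbox_pkg/functions/customer_groups.py | groups_by_id
-- ===== SOURCE A (Python) =====
-- def groups_by_id(customer_id:int,n_first_id:int=0) -> dict:
--     '''
--     Функция используется для подсчета числа
--     покупателей, попадающих в каждую из групп
--     [группа - сумма цифр в ID покупателя].
--     На вход функция получает 2 параметра:
--     customer_id - ID покупателя, до которого[включительно] ведется
--                   подсчет групп и их значений
--     n_first_id - начальное значение ID покупателя, с которого[включительно]
--                ведется подсчет групп и их значений
--     Функция возвращает словарь: {"группа":"число покупателей в группе"}.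
--     Если хоть один из входных параметров не соответствует типу int,
--     то функция возвращает пустой словарь: {}.
--     Если хоть один из входных параметров отрицательный, то
--     функция возвращает пустой словарь: {}.
--     Если  значение customer_id меньше значения n_first_id, то
--     происходит обмен значениями, и функция формирует группы
--     покупателей на отрезке [customer_id,n_first_id], а не
--     на отрезке [n_first_id, customer_id], как предполагается изначально.
--
--     '''
--     # data type check
--     if not (isinstance(customer_id,int) and isinstance(n_first_id,int)):
--         return {}
--     elif customer_id < 0 or n_first_id < 0:
--         return {}
--     groups = {}
--     [groups.update({count_num(i):1}) if count_num(i) not in groups.keys()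
--      else groups.update({count_num(i):groups[count_num(i)]+1}) \
--     for i in range(n_first_id,customer_id+1)]
--     return groups
--
-- def count_num(num:int) -> int:
--     '''
--     Функция используется для подсчета суммы цифр
--     целого(int) числа
--     num - исходное число
--     Функция возвращает значение суммы цифр числа num.
--     Если число num не относится к целым(int), то
--     функция возвращает -1.
--     '''
--     if not isinstance(num, int):
--         msg = f'Допустимы только целочисленные значения \n\
--             ("{type(num)}" - было использовано).'
--         raise TypeError(msg)
--     elif num < 0:
--         msg = f'Допустимы только целочисленные ПОЛОЖИТЕЛЬНЫЕ(включая 0) \n\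
--             значения("{num}" - было использовано).'
--         raise ValueError(msg)
--     return sum([int(i) for i in list(str(num))])
-- ===== SOURCE B (Python) =====
-- def groups_by_id(customer_id: int, n_first_id: int = 0) -> dict:
--     '''Count customers per digit-sum group over [n_first_id, customer_id].
--     Decade-blocked: the digit sum is computed arithmetically once per block
--     of ten consecutive ids (ds(10q+b) = ds(q)+b), instead of str()-per-id.'''
--     if not (isinstance(customer_id, int) and isinstance(n_first_id, int)):
--         return {}
--     if customer_id < 0 or n_first_id < 0:
--         return {}
--     groups = {}
--
--     def digit_sum(n):
--         s = 0
--         while n > 0: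
--             s += n % 10
--             n //= 10
--         return s
--
--     def bump(s):
--         groups[s] = groups.get(s, 0) + 1
--
--     lo, hi = n_first_id, customer_id + 1          # half-open [lo, hi)
--     m = min(hi, -(-lo // 10) * 10)                # end of the leading partial decade
--     t = max(m, hi // 10 * 10)                     # start of the trailing partial decade
--     for i in range(lo, m):
--         bump(digit_sum(i))
--     for q in range(m // 10, t // 10):             # full decades [10q, 10q+10)
--         dq = digit_sum(q)
--         for b in range(10):
--             bump(dq + b)
--     for i in range(t, hi):
--         bump(digit_sum(i))
--     return groups
-- ===== Notes on version B (the rewrite author's own statement) =====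
-- stated objective: faster
-- what changed: B walks the interval in decade blocks, computing one arithmetic digit sum per block of ten consecutive ids (using ds(10q+b) = ds(q)+b) and bumping a get-based counter, instead of A's per-id str()-conversion dict-update loop that calls count_num 2-3 times per id.
import Mathlib
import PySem

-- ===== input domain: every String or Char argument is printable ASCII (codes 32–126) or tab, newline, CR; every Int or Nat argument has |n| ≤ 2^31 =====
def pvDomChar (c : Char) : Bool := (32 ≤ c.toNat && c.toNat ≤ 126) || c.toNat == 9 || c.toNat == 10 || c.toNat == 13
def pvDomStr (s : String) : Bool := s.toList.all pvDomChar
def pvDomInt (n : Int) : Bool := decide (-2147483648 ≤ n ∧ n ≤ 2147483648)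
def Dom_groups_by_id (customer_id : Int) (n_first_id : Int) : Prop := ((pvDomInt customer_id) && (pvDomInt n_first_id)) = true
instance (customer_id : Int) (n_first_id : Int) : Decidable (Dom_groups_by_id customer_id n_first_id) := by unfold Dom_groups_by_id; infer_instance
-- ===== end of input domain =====

-- B re-implements A by decade blocks with an arithmetic digit sum (one digit_sum call per ten
-- consecutive ids instead of 2-3 str()-based ones per id); same exact dict, same key order.

-- ===== PORT A =====
-- count_num: sum(int(ch) for ch in str(num)). Exact for num ≥ 0, the only values
-- groups_by_id ever passes (for num < 0 Python raises ValueError — unreachable here,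
-- since the loop body runs only when both arguments are ≥ 0).
def count_num (num : Int) : Int :=
  ((PySem.Int.toChars num).map (fun c => (PySem.Int.ofChars? [c]).getD 0)).sum

-- the isinstance check is always true under the type convention (both arguments are int)
def groups_by_id (customer_id : Int) (n_first_id : Int) : List (Int × Int) :=
  if customer_id < 0 ∨ n_first_id < 0 then []
  else
    ((PySem.List.pyRange n_first_id (customer_id + 1) 1).foldl
      (fun groups i =>
        if groups.contains (count_num i) then
          -- groups[count_num(i)] cannot raise KeyError in this branch, so getD is exact
          groups.insert (count_num i) (groups.getD (count_num i) 0 + 1)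
        else
          groups.insert (count_num i) 1)
      PySem.Dict.empty).items

-- ===== PORT B =====
-- digit_sum: s = 0; while n > 0: s += n % 10; n //= 10; return s
def digit_sum (n : Int) : Int :=
  if 0 < n then PySem.Int.mod n 10 + digit_sum (PySem.Int.floordiv n 10)
  else 0
termination_by n.toNat
decreasing_by
  rw [PySem.Int.floordiv_eq_ediv_of_pos (by omega : (0:Int) < 10)]
  omega

-- bump: groups[s] = groups.get(s, 0) + 1
def bump (groups : PySem.Dict Int Int) (s : Int) : PySem.Dict Int Int :=
  groups.insert s (groups.getD s 0 + 1)

def groups_by_id_alt (customer_id : Int) (n_first_id : Int) : List (Int × Int) :=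
  if customer_id < 0 ∨ n_first_id < 0 then []
  else
    let lo := n_first_id
    let hi := customer_id + 1
    let m := min hi (-(PySem.Int.floordiv (-lo) 10) * 10)
    let t := max m (PySem.Int.floordiv hi 10 * 10)
    let d1 := (PySem.List.pyRange lo m 1).foldl (fun d i => bump d (digit_sum i)) PySem.Dict.empty
    let d2 := (PySem.List.pyRange (PySem.Int.floordiv m 10) (PySem.Int.floordiv t 10) 1).foldl
                (fun d q => (PySem.List.pyRange 0 10 1).foldl (fun d b => bump d (digit_sum q + b)) d) d1
    let d3 := (PySem.List.pyRange t hi 1).foldl (fun d i => bump d (digit_sum i)) d2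
    d3.items

-- ===== PRECONDITION & SPEC =====
def Spec_groups_by_id (customer_id : Int) (n_first_id : Int) (out : List (Int × Int)) : Prop := out = groups_by_id_alt customer_id n_first_id
instance (customer_id : Int) (n_first_id : Int) (out : List (Int × Int)) : Decidable (Spec_groups_by_id customer_id n_first_id out) := by unfold Spec_groups_by_id; infer_instance

-- ===== CLAIM (what is proved, stated in full; the proofs are below) =====
def Claim_equal_groups_by_id : Prop := ∀ (customer_id : Int) (n_first_id : Int), Dom_groups_by_id customer_id n_first_id → Spec_groups_by_id customer_id n_first_id (groups_by_id customer_id n_first_id)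

-- ===== LEMMAS AND PROOFS =====

-- digit sum of n through Mathlib's Nat.digits: the common value of count_num and digit_sum
def dsum (n : Nat) : Int := ((Nat.digits 10 n).map (Nat.cast)).sum

-- core's Nat.toDigits (what PySem.Int.toChars uses for n ≥ 0), characterised by Nat.digits
lemma toDigitsCore_spec : ∀ (n fuel : Nat) (ds : List Char), n < fuel →
    Nat.toDigitsCore 10 fuel n ds
      = (if n = 0 then ['0'] else ((Nat.digits 10 n).map Nat.digitChar).reverse) ++ ds := by
  intro n
  induction n using Nat.strong_induction_on with
  | _ n ih =>
    intro fuel ds hf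
    match fuel, hf with
    | fuel + 1, _ =>
      rw [Nat.toDigitsCore]
      by_cases h : n / 10 = 0
      · have hn : n < 10 := by omega
        simp only [h]
        by_cases h0 : n = 0
        · subst h0; simp [Nat.digitChar]
        · rw [if_neg h0, Nat.digits_def' (by norm_num : 1 < 10) (Nat.pos_of_ne_zero h0), h]
          simp [Nat.mod_eq_of_lt hn]
      · simp only [h]
        rw [ih (n / 10) (by omega) fuel ((n % 10).digitChar :: ds) (by omega)]
        rw [if_neg h]
        have h0 : n ≠ 0 := by omega
        rw [if_neg h0, Nat.digits_def' (by norm_num : 1 < 10) (Nat.pos_of_ne_zero h0)]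
        simp

-- int(ch) of a digit character
lemma charVal_digitChar (d : Nat) (hd : d < 10) :
    (PySem.Int.ofChars? [Nat.digitChar d]).getD 0 = (d : Int) := by
  interval_cases d <;> decide

lemma count_num_eq (i : Int) (hi : 0 ≤ i) : count_num i = dsum i.toNat := by
  unfold count_num
  rw [PySem.Int.toChars, if_neg (by omega)]
  rw [Nat.toDigits, toDigitsCore_spec _ _ _ (by omega)]
  by_cases h0 : i.toNat = 0
  · rw [if_pos h0, h0]; decide
  · rw [if_neg h0]
    simp only [List.append_nil, List.map_reverse, List.sum_reverse, List.map_map]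
    simp only [Function.comp_def]
    rw [List.map_congr_left
      (fun d hd => charVal_digitChar d (Nat.digits_lt_base (by norm_num) hd))]
    unfold dsum
    rfl

lemma digit_sum_eq : ∀ (n : Nat) (i : Int), 0 ≤ i → i.toNat = n → digit_sum i = dsum n := by
  intro n
  induction n using Nat.strong_induction_on with
  | _ n ih =>
    intro i hi hn
    rw [digit_sum]
    by_cases h : 0 < i
    · rw [if_pos h, PySem.Int.mod_eq_emod_of_pos (by omega), PySem.Int.floordiv_eq_ediv_of_pos (by omega)]
      rw [ih ((i / 10).toNat) (by omega) (i / 10) (by omega) rfl]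
      have hd : Nat.digits 10 n = n % 10 :: Nat.digits 10 (n / 10) :=
        Nat.digits_def' (by norm_num) (by omega)
      unfold dsum
      rw [hd]
      simp only [List.map_cons, List.sum_cons]
      have h1 : (i / 10).toNat = n / 10 := by omega
      have h2 : i % 10 = ((n % 10 : Nat) : Int) := by omega
      rw [h1, h2]
    · rw [if_neg h]
      have : n = 0 := by omega
      subst this
      simp [dsum]

lemma digit_sum_ten (q b : Int) (hq : 0 ≤ q) (hb0 : 0 ≤ b) (hb : b < 10) :
    digit_sum (10 * q + b) = digit_sum q + b := by
  by_cases h : 0 < 10 * q + b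
  · rw [digit_sum, if_pos h, PySem.Int.mod_eq_emod_of_pos (by omega),
        PySem.Int.floordiv_eq_ediv_of_pos (by omega)]
    have h1 : (10 * q + b) % 10 = b := by omega
    have h2 : (10 * q + b) / 10 = q := by omega
    rw [h1, h2]; ring
  · have hq0 : q = 0 := by omega
    have hb0' : b = 0 := by omega
    subst hq0; subst hb0'
    norm_num

-- one iteration of A's loop is one bump of the same digit sum
lemma stepA_eq (d : PySem.Dict Int Int) (i : Int) (hi : 0 ≤ i) :
    (if d.contains (count_num i) then d.insert (count_num i) (d.getD (count_num i) 0 + 1)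
     else d.insert (count_num i) 1) = bump d (digit_sum i) := by
  have hk : count_num i = digit_sum i := by
    rw [count_num_eq i hi, digit_sum_eq i.toNat i hi rfl]
  rw [hk]
  unfold bump
  cases hc : d.contains (digit_sum i)
  · rw [if_neg Bool.false_ne_true, PySem.Dict.getD_of_not_contains d 0 hc]
    norm_num
  · rw [if_pos rfl]

lemma decade_range (q : Int) :
    PySem.List.pyRange (10 * q) (10 * q + 10) 1 = (PySem.List.pyRange 0 10 1).map (fun b => 10 * q + b) := by
  rw [PySem.List.pyRange_one, PySem.List.pyRange_one]
  simp [List.map_map, Function.comp_def]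

-- B's inner loop over one full decade equals ten iterations of the flat loop
lemma inner_eq (q : Int) (hq : 0 ≤ q) (d : PySem.Dict Int Int) :
    (PySem.List.pyRange 0 10 1).foldl (fun d b => bump d (digit_sum q + b)) d
      = (PySem.List.pyRange (10 * q) (10 * q + 10) 1).foldl (fun d i => bump d (digit_sum i)) d := by
  rw [decade_range, List.foldl_map]
  apply PySem.List.foldl_congr_mem
  intro acc b hb
  rw [PySem.List.mem_pyRange_one] at hb
  rw [digit_sum_ten q b hq hb.1 hb.2]

-- B's decade loop over [M, M+k) equals the flat loop over [10M, 10(M+k))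
lemma middle_eq : ∀ (k : Nat) (M : Int), 0 ≤ M → ∀ (d : PySem.Dict Int Int),
    (PySem.List.pyRange M (M + (k : Int)) 1).foldl
      (fun d q => (PySem.List.pyRange 0 10 1).foldl (fun d b => bump d (digit_sum q + b)) d) d
      = (PySem.List.pyRange (10 * M) (10 * (M + (k : Int))) 1).foldl (fun d i => bump d (digit_sum i)) d := by
  intro k
  induction k with
  | zero =>
    intro M hM d
    push_cast
    simp only [add_zero]
    rw [PySem.List.pyRange_one_eq_nil (le_refl M), PySem.List.pyRange_one_eq_nil (le_refl (10 * M))]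
    rw [List.foldl_nil, List.foldl_nil]
  | succ k ih =>
    intro M hM d
    have hcast : ((k + 1 : Nat) : Int) = (k : Int) + 1 := by push_cast; ring
    rw [hcast]
    rw [PySem.List.pyRange_one_cons (a := M) (b := M + ((k : Int) + 1)) (by omega)]
    rw [PySem.List.pyRange_one_append (10 * M) (10 * M + 10) (10 * (M + ((k : Int) + 1)))
          (by omega) (by omega)]
    rw [List.foldl_append, List.foldl_cons]
    rw [inner_eq M hM d]
    have e1 : M + ((k : Int) + 1) = (M + 1) + (k : Int) := by ring
    have e2 : 10 * M + 10 = 10 * (M + 1) := by ring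
    rw [e1, e2]
    exact ih (M + 1) (by omega) _

-- ===== VERDICT (by name: the statement is the Claim_ definition above) =====
theorem groups_by_id_spec : Claim_equal_groups_by_id := by
  intro c n _
  unfold Spec_groups_by_id
  simp only [groups_by_id, groups_by_id_alt]
  by_cases hneg : c < 0 ∨ n < 0
  · rw [if_pos hneg, if_pos hneg]
  · rw [if_neg hneg, if_neg hneg]
    obtain ⟨hc', hn'⟩ := not_or.mp hneg
    have hc : 0 ≤ c := by omega
    have hn : 0 ≤ n := by omega
    simp only [PySem.Int.floordiv_eq_ediv_of_pos (show (0:Int) < 10 by norm_num)]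
    set m := min (c + 1) (-(-n / 10) * 10) with hm
    set t := max m ((c + 1) / 10 * 10) with ht
    have hA : (PySem.List.pyRange n (c + 1) 1).foldl
        (fun groups i =>
          if groups.contains (count_num i) then
            groups.insert (count_num i) (groups.getD (count_num i) 0 + 1)
          else groups.insert (count_num i) 1) PySem.Dict.empty
        = (PySem.List.pyRange n (c + 1) 1).foldl (fun d i => bump d (digit_sum i)) PySem.Dict.empty := by
      apply PySem.List.foldl_congr_mem
      intro acc i hi
      rw [PySem.List.mem_pyRange_one] at hi
      exact stepA_eq acc i (by omega)
    rw [hA]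
    by_cases hord : c + 1 ≤ n
    · -- empty interval: every range is empty on both sides
      have h1 : m ≤ n := by omega
      have h2 : t / 10 ≤ m / 10 := by omega
      have h3 : c + 1 ≤ t := by omega
      rw [PySem.List.pyRange_one_eq_nil (a := n) (b := c + 1) hord,
          PySem.List.pyRange_one_eq_nil (a := n) (b := m) h1,
          PySem.List.pyRange_one_eq_nil (a := m / 10) (b := t / 10) h2,
          PySem.List.pyRange_one_eq_nil (a := t) (b := c + 1) h3]
      simp only [List.foldl_nil]
    · have hord' : n < c + 1 := by omega
      have hnm : n ≤ m := by omega
      have hmt : m ≤ t := by omega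
      have hth : t ≤ c + 1 := by omega
      rw [PySem.List.pyRange_one_append n m (c + 1) hnm (by omega),
          PySem.List.pyRange_one_append m t (c + 1) hmt hth,
          List.foldl_append, List.foldl_append]
      have hmid : ∀ D : PySem.Dict Int Int,
          (PySem.List.pyRange (m / 10) (t / 10) 1).foldl
            (fun d q => (PySem.List.pyRange 0 10 1).foldl (fun d b => bump d (digit_sum q + b)) d) D
          = (PySem.List.pyRange m t 1).foldl (fun d i => bump d (digit_sum i)) D := by
        intro D
        by_cases htm : t = m
        · rw [htm, PySem.List.pyRange_one_eq_nil (a := m / 10) (b := m / 10) le_rfl,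
              PySem.List.pyRange_one_eq_nil (a := m) (b := m) le_rfl]
          simp only [List.foldl_nil]
        · have h1 : m = 10 * (m / 10) := by omega
          have h2 : t = 10 * (t / 10) := by omega
          have h3 : m / 10 ≤ t / 10 := by omega
          have hK : t / 10 = m / 10 + (((t / 10 - m / 10).toNat : Nat) : Int) := by omega
          rw [hK, middle_eq ((t / 10 - m / 10).toNat) (m / 10) (by omega)]
          rw [show 10 * (m / 10) = m from h1.symm,
              show 10 * (m / 10 + (((t / 10 - m / 10).toNat : Nat) : Int)) = t by omega]
      rw [hmid]
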